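-- pv_equiv track=rewrite | github.com/Captass/FLARE-AI | backend/agents/supervisor.py | _ensure_suggestions
-- ===== SOURCE A (Python) =====
-- def _ensure_suggestions(suggestions: list[str], worker_type: str) -> list[str]:
--     cleaned = []
--     for suggestion in suggestions:
--         text = (suggestion or "").strip()
--         if text and text not in cleaned:
--             cleaned.append(text)
--     defaults = {
--         "researcher": ["Creer un resume executif", "Comparer plusieurs options"],
--         "media": ["Creer une variante plus premium", "Adapter au format mobile"],
--         "document": ["Ameliorer la structure du document", "Generer une version plus concise"],
--         "sheet": ["Ajouter des formules utiles", "Creer un tableau de bord visuel"],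
--         "workspace": ["Preparer le message a envoyer", "Structurer les prochaines actions"],
--         "chat": ["Approfondir ce sujet", "Passer a une action concrete"],
--     }
--     for fallback in defaults.get(worker_type, defaults["chat"]):
--         if len(cleaned) >= 2:
--             break
--         if fallback not in cleaned:
--             cleaned.append(fallback)
--     return cleaned[:2]
-- ===== SOURCE B (Python) =====
-- def _ensure_suggestions(suggestions: list[str], worker_type: str) -> list[str]:
--     defaults = {
--         "researcher": ["Creer un resume executif", "Comparer plusieurs options"],
--         "media": ["Creer une variante plus premium", "Adapter au format mobile"],
--         "document": ["Ameliorer la structure du document", "Generer une version plus concise"],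
--         "sheet": ["Ajouter des formules utiles", "Creer un tableau de bord visuel"],
--         "workspace": ["Preparer le message a envoyer", "Structurer les prochaines actions"],
--         "chat": ["Approfondir ce sujet", "Passer a une action concrete"],
--     }
--
--     def candidates():
--         for s in suggestions:
--             t = s.strip()
--             if t:
--                 yield t
--         yield from defaults.get(worker_type, defaults["chat"])
--
--     gen = candidates()
--     first = next(gen, None)
--     if first is None:
--         return []
--     for second in gen:
--         if second != first:
--             return [first, second]
--     return [first]
-- ===== Notes on version B (the rewrite author's own statement) =====
-- stated objective: alternative
-- what changed: Replaces A's dedup-list building (membership-checked appends plus a break-at-2 padding loop) with a short-circuit search over a lazy candidate stream (stripped non-empty suggestions then the defaults): take the first candidate, then scan for the first later candidate different from it; no seen/cleaned list is ever maintained.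
import Mathlib
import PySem

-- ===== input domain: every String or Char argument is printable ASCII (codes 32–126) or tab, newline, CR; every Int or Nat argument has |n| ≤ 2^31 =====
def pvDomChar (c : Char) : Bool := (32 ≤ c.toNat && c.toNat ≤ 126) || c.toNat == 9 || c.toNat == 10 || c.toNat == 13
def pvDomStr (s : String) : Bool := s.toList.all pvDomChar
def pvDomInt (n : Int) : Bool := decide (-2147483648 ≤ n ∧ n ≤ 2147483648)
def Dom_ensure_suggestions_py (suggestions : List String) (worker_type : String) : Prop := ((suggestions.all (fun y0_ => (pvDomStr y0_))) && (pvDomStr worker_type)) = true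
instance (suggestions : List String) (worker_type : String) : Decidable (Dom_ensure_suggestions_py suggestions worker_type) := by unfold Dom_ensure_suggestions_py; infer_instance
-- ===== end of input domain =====

-- B replaces A's dedup-list building and break-at-2 padding with a short-circuit search
-- over the candidate stream (stripped non-empty suggestions then raw defaults): first
-- candidate, then first later candidate differing from it (objective: alternative).


-- the shared defaults table (both Pythons carry the identical literal dict)
def pvDefaults : PySem.Dict String (List String) :=
  PySem.Dict.ofList
    [ ("researcher", ["Creer un resume executif", "Comparer plusieurs options"])
    , ("media", ["Creer une variante plus premium", "Adapter au format mobile"])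
    , ("document", ["Ameliorer la structure du document", "Generer une version plus concise"])
    , ("sheet", ["Ajouter des formules utiles", "Creer un tableau de bord visuel"])
    , ("workspace", ["Preparer le message a envoyer", "Structurer les prochaines actions"])
    , ("chat", ["Approfondir ce sujet", "Passer a une action concrete"]) ]

-- ===== PORT A =====
-- first loop: '(suggestion or "").strip()' — on a str, 'suggestion or ""' is suggestion
-- (only the empty string is falsy, and strip "" = ""), so it is strip suggestion exactly.
def pvCleanLoop (suggestions : List String) : List String :=
  suggestions.foldl
    (fun cleaned suggestion =>
      let text := PySem.Str.strip suggestion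
      if text ≠ "" ∧ text ∉ cleaned then cleaned ++ [text] else cleaned)
    []

-- second loop with its 'break' once len(cleaned) >= 2
def pvPadLoop (cleaned : List String) : List String → List String
  | [] => cleaned
  | fallback :: rest =>
    if cleaned.length ≥ 2 then cleaned
    else if fallback ∉ cleaned then pvPadLoop (cleaned ++ [fallback]) rest
    else pvPadLoop cleaned rest

def ensure_suggestions_py (suggestions : List String) (worker_type : String) : List String :=
  let cleaned := pvCleanLoop suggestions
  let pool := PySem.Dict.getD pvDefaults worker_type (PySem.Dict.getD pvDefaults "chat" [])
  PySem.List.slice (pvPadLoop cleaned pool) none (some 2)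

-- ===== PORT B =====
-- B's generator 'candidates()': strip of each suggestion when non-empty, then the pool
def pvCandidates (suggestions : List String) (pool : List String) : List String :=
  ((suggestions.map PySem.Str.strip).filter (fun t => t ≠ "")) ++ pool

-- B's 'for second in gen: if second != first: return [first, second]' / 'return [first]'
def pvFindSecond (first : String) : List String → List String
  | [] => [first]
  | second :: rest => if second ≠ first then [first, second] else pvFindSecond first rest

def ensure_suggestions_py_alt (suggestions : List String) (worker_type : String) : List String :=
  let pool := PySem.Dict.getD pvDefaults worker_type (PySem.Dict.getD pvDefaults "chat" [])
  match pvCandidates suggestions pool with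
  | [] => []
  | first :: rest => pvFindSecond first rest

-- ===== PRECONDITION & SPEC =====
def Spec_ensure_suggestions_py (suggestions : List String) (worker_type : String) (out : List String) : Prop := out = ensure_suggestions_py_alt suggestions worker_type
instance (suggestions : List String) (worker_type : String) (out : List String) : Decidable (Spec_ensure_suggestions_py suggestions worker_type out) := by unfold Spec_ensure_suggestions_py; infer_instance

-- ===== CLAIM (what is proved, stated in full; the proofs are below) =====
def Claim_equal_ensure_suggestions_py : Prop := ∀ (suggestions : List String) (worker_type : String), Dom_ensure_suggestions_py suggestions worker_type → Spec_ensure_suggestions_py suggestions worker_type (ensure_suggestions_py suggestions worker_type)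

-- ===== LEMMAS AND PROOFS =====

-- the order-preserving dedup step (used only in the proof as the common reference)
def pvStep (result : List String) (item : String) : List String :=
  if item ∉ result then result ++ [item] else result

-- A's clean loop over suggestions = dedup fold over the stripped-and-filtered list
theorem pvClean_eq_dedup (suggestions : List String) (acc : List String) :
    suggestions.foldl
      (fun cleaned suggestion =>
        let text := PySem.Str.strip suggestion
        if text ≠ "" ∧ text ∉ cleaned then cleaned ++ [text] else cleaned)
      acc
    = ((suggestions.map PySem.Str.strip).filter (fun t => t ≠ "")).foldl pvStep acc := by
  induction suggestions generalizing acc with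
  | nil => rfl
  | cons s rest ih =>
    simp only [List.foldl_cons, List.map_cons, List.filter_cons]
    by_cases h0 : PySem.Str.strip s = ""
    · simp [h0, ih]
    · by_cases hm : PySem.Str.strip s ∈ acc
      · simp [pvStep, h0, hm, ih]
      · simp [pvStep, h0, hm, ih]

-- dedup fold only appends to its accumulator
theorem pvDedup_fold_append (l : List String) (acc : List String) :
    ∃ d, l.foldl pvStep acc = acc ++ d := by
  induction l generalizing acc with
  | nil => exact ⟨[], by simp⟩
  | cons x rest ih =>
    simp only [List.foldl_cons, pvStep]
    by_cases hm : x ∈ acc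
    · simpa [hm] using ih acc
    · obtain ⟨d, hd⟩ := ih (acc ++ [x])
      exact ⟨[x] ++ d, by simp [hm, hd]⟩

-- A's padding loop (with its break) and the dedup fold agree after take 2
theorem pvPad_take_eq (l : List String) (acc : List String) :
    (pvPadLoop acc l).take 2 = (l.foldl pvStep acc).take 2 := by
  induction l generalizing acc with
  | nil => rfl
  | cons fb rest ih =>
    simp only [pvPadLoop, List.foldl_cons, pvStep]
    by_cases hlen : acc.length ≥ 2
    · obtain ⟨d, hd⟩ := pvDedup_fold_append rest (if fb ∉ acc then acc ++ [fb] else acc)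
      simp only [hlen, if_true, hd]
      by_cases hm : fb ∈ acc
      · simp only [hm, not_true_eq_false, if_false]
        rw [List.take_append_of_le_length hlen]
      · simp only [hm, not_false_eq_true, if_true, List.append_assoc]
        rw [List.take_append_of_le_length hlen]
    · by_cases hm : fb ∈ acc
      · simp only [hlen, if_false, hm, not_true_eq_false]
        exact ih acc
      · simp only [hlen, if_false, hm, not_false_eq_true, if_true]
        exact ih (acc ++ [fb])

-- take 2 of the dedup fold seeded with [x] = B's first-distinct-from-x search
theorem pvFirstTwo_eq (rest : List String) (x : String) :
    (rest.foldl pvStep [x]).take 2 = pvFindSecond x rest := by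
  induction rest with
  | nil => rfl
  | cons y rest ih =>
    simp only [List.foldl_cons, pvStep, pvFindSecond]
    by_cases hy : y = x
    · simp [hy, ih]
    · obtain ⟨d, hd⟩ := pvDedup_fold_append rest [x, y]
      have : y ∉ [x] := by simp [hy]
      simp only [this, if_true, hy, ne_eq, not_false_eq_true]
      have hxy : ([x] ++ [y]) = [x, y] := rfl
      rw [hxy, hd]
      simp

-- ===== VERDICT (by name: the statement is the Claim_ definition above) =====
theorem ensure_suggestions_py_spec : Claim_equal_ensure_suggestions_py := by
  intro suggestions worker_type _
  unfold Spec_ensure_suggestions_py ensure_suggestions_py ensure_suggestions_py_alt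
  simp only [pvCleanLoop, pvCandidates]
  rw [pvClean_eq_dedup]
  have h2 : (some (2 : Int)) = some ((2 : Nat) : Int) := rfl
  rw [h2, PySem.List.slice_to_natCast, pvPad_take_eq, ← List.foldl_append]
  cases hc : ((suggestions.map PySem.Str.strip).filter (fun t => t ≠ "")) ++
      PySem.Dict.getD pvDefaults worker_type (PySem.Dict.getD pvDefaults "chat" []) with
  | nil => simp
  | cons first rest =>
    simp only [List.foldl_cons]
    have hstep : pvStep [] first = [first] := by simp [pvStep]
    rw [hstep, pvFirstTwo_eq]
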